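-- pv_equiv track=rewrite | github.com/dudeperf3ct/aoc | 2024/day9/main.py | create_tape1
-- ===== SOURCE A (Python) =====
-- def create_tape1(data):
--     files = []
--     for i in range(len(data)):
--         if i % 2 == 0:
--             files.extend([i // 2] * data[i])
--     res, i = [], 0
--     while len(files) > 0:
--         if i % 2 == 0:
--             res.extend(files[: data[i]])
--             del files[: data[i]]
--         elif data[i] != 0:
--             res.extend(reversed(files[-data[i] :]))
--             del files[-data[i] :]
--         i += 1
--     return res
-- ===== SOURCE B (Python) =====
-- def create_tape1(data):
--     # Build the full file-block sequence once, then fill gaps by slicing a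
--     # precomputed reversed copy with a moving cursor; truncate to total blocks.
--     blocks = []
--     for i in range(0, len(data), 2):
--         blocks.extend([i // 2] * data[i])
--     rev = blocks[::-1]
--     out, b = [], 0
--     for i in range(len(data)):
--         if i % 2 == 0:
--             out.extend([i // 2] * data[i])
--         else:
--             out.extend(rev[b:b + data[i]])
--             b += data[i]
--     return out[:len(blocks)]
-- ===== Notes on version B (the rewrite author's own statement) =====
-- stated objective: alternative
-- what changed: A simulates compaction by repeatedly slicing and deleting from a mutable block list (`del files[:d]` / `del files[-d:]`); B builds the block sequence once, precomputes its reversal, fills each gap by slicing the reversed copy at a moving cursor with no deletions, and truncates the concatenation to the total block count (intended as faster, O(n+T) vs A's O(n*T) deletions, but a timing run could not confirm it: both sides fail at the largest size, ratio 1.52 at n=4096).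
-- outside the precondition, e.g. on create_tape1([-2, 4, 3, 1, 1]): A returns [1, 1, 2, 1], B returns [2, 1, 1, 1]
import Mathlib
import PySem

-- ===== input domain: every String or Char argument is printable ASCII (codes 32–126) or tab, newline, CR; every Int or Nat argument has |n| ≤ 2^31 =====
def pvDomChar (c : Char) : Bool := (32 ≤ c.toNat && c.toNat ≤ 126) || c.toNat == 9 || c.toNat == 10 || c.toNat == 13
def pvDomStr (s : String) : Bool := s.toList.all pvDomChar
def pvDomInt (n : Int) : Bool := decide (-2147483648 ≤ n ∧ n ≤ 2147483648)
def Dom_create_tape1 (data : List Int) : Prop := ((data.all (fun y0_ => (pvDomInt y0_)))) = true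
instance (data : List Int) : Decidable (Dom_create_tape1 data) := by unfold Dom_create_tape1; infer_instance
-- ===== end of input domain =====

-- B replaces A's delete-as-you-go simulation over a mutable block list by a single
-- pass over a precomputed reversed block list with a moving cursor, truncated to the
-- total block count (objective: alternative — no mutation or deletion, one pass).

-- ===== PORT A =====
-- the `while len(files) > 0` loop of A; fuel makes the recursion total (under
-- Pre_ the loop runs at most len(data) times, so fuel len(data)+1 never runs out)
def tapeLoopA (data : List Int) : Nat → List Int → Int → List Int → List Int
  | 0, _, _, res => res
  | fuel+1, files, i, res =>
    if files.length = 0 then res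
    else
      let d := PySem.List.pyGetD data i 0
      if PySem.Int.mod i 2 = 0 then
        tapeLoopA data fuel (PySem.List.slice files (some d) none) (i + 1)
          (res ++ PySem.List.slice files none (some d))
      else if d ≠ 0 then
        tapeLoopA data fuel (PySem.List.slice files none (some (-d))) (i + 1)
          (res ++ (PySem.List.slice files (some (-d)) none).reverse)
      else tapeLoopA data fuel files (i + 1) res

def create_tape1 (data : List Int) : List Int :=
  let files := (List.range data.length).foldl
    (fun files i => if i % 2 = 0 then
        files ++ PySem.List.pyRepeat [((i / 2 : Nat) : Int)] (PySem.List.pyGetD data (i : Int) 0)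
      else files) []
  tapeLoopA data (data.length + 1) files 0 []

-- ===== PORT B =====
def create_tape1_alt (data : List Int) : List Int :=
  let blocks := (PySem.List.pyRange 0 (PySem.List.len data) 2).foldl
    (fun bl i => bl ++ PySem.List.pyRepeat [PySem.Int.floordiv i 2] (PySem.List.pyGetD data i 0)) []
  let rev := blocks.reverse   -- blocks[::-1]  (PySem.List.slice?_none_none_neg_one)
  let ob := (List.range data.length).foldl
    (fun (s : List Int × Int) i =>
      if i % 2 = 0 then
        (s.1 ++ PySem.List.pyRepeat [((i / 2 : Nat) : Int)] (PySem.List.pyGetD data (i : Int) 0), s.2)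
      else
        (s.1 ++ PySem.List.slice rev (some s.2) (some (s.2 + PySem.List.pyGetD data (i : Int) 0)),
         s.2 + PySem.List.pyGetD data (i : Int) 0))
    ([], 0)
  PySem.List.slice ob.1 none (some (PySem.List.len blocks))

-- ===== PRECONDITION & SPEC =====
-- Pre_ restricts to the natural disk-map domain: all entries nonnegative (a disk map
-- is a digit string). A still returns on many negative inputs, where its Python
-- slices wrap around; B happens to coincide with A on most of those, but not all
-- (e.g. on [-2, 4, 3, 1, 1] A gives [1, 1, 2, 1] and B gives [2, 1, 1, 1]).
def Pre_create_tape1 (data : List Int) : Prop := ∀ x ∈ data, 0 ≤ x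
instance (data : List Int) : Decidable (Pre_create_tape1 data) := by unfold Pre_create_tape1; infer_instance
def pvWitness_create_tape1 : List Int := [1, 2, 3, 4, 5]

def Spec_create_tape1 (data : List Int) (out : List Int) : Prop := out = create_tape1_alt data
instance (data : List Int) (out : List Int) : Decidable (Spec_create_tape1 data out) := by unfold Spec_create_tape1; infer_instance

-- ===== CLAIM (what is proved, stated in full; the proofs are below) =====
def Claim_equal_create_tape1 : Prop := ∀ (data : List Int), Dom_create_tape1 data → Pre_create_tape1 data → Spec_create_tape1 data (create_tape1 data)

-- ===== LEMMAS AND PROOFS =====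

-- the file-block segment contributed by data index i (a file only at even i)
def gseg (data : List Int) (i : Nat) : List Int :=
  if i % 2 = 0 then List.replicate (data.getD i 0).toNat ((i / 2 : Nat) : Int) else []

-- the full initial block list
def blocksOf (data : List Int) : List Int := (List.range data.length).flatMap (gseg data)

-- B's back-cursor after processing segments [0, t)
def bcur (data : List Int) : Nat → Nat
  | 0 => 0
  | t+1 => bcur data t + (if t % 2 = 0 then 0 else (data.getD t 0).toNat)

-- blocks consumed from the front of A's files after segments [0, t)
def fcur (data : List Int) (t : Nat) : Nat := ((List.range t).flatMap (gseg data)).length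

-- the (untruncated) chunk B appends for segment t
def outSeg (data : List Int) (t : Nat) : List Int :=
  if t % 2 = 0 then List.replicate (data.getD t 0).toNat ((t / 2 : Nat) : Int)
  else ((blocksOf data).reverse.drop (bcur data t)).take (data.getD t 0).toNat

-- B's untruncated output after segments [0, t)
def flatOut (data : List Int) (t : Nat) : List Int := (List.range t).flatMap (outSeg data)

lemma getD_nonneg {data : List Int} (hpre : ∀ x ∈ data, 0 ≤ x) (t : Nat) :
    0 ≤ data.getD t 0 := by
  rcases lt_or_ge t data.length with h | h
  · rw [List.getD_eq_getElem data 0 h]; exact hpre _ (List.getElem_mem h)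
  · rw [List.getD_eq_default data 0 h]

lemma flat_split (f : Nat → List Int) {t n : Nat} (h : t ≤ n) :
    (List.range n).flatMap f
      = (List.range t).flatMap f ++ ((List.range (n - t)).map (t + ·)).flatMap f := by
  conv_lhs => rw [show n = t + (n - t) by omega]
  rw [List.range_add, List.flatMap_append]

lemma suffix_cons (f : Nat → List Int) {t n : Nat} (h : t < n) :
    ((List.range (n - t)).map (t + ·)).flatMap f
      = f t ++ ((List.range (n - (t + 1))).map ((t + 1) + ·)).flatMap f := by
  rw [show n - t = (n - (t + 1)) + 1 by omega, List.range_succ_eq_map]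
  simp only [List.map_cons, List.map_map, List.flatMap_cons, Nat.add_zero]
  congr 2
  apply List.map_congr_left
  intro x _
  simp [Function.comp]
  omega

lemma drop_flat (f : Nat → List Int) {t n : Nat} (h : t ≤ n) :
    ((List.range n).flatMap f).drop ((List.range t).flatMap f).length
      = ((List.range (n - t)).map (t + ·)).flatMap f := by
  rw [flat_split f h, List.drop_left]

lemma drop_fcur {data : List Int} {t : Nat} (h : t < data.length) :
    (blocksOf data).drop (fcur data t)
      = gseg data t ++ (blocksOf data).drop (fcur data (t + 1)) := by
  unfold blocksOf fcur
  rw [drop_flat _ (le_of_lt h), drop_flat _ h, suffix_cons _ h]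

lemma fcur_succ (data : List Int) (t : Nat) :
    fcur data (t + 1) = fcur data t + (gseg data t).length := by
  simp [fcur, List.range_succ]

lemma flatOut_succ (data : List Int) (t : Nat) :
    flatOut data (t + 1) = flatOut data t ++ outSeg data t := by
  simp [flatOut, List.range_succ]

lemma fcur_length (data : List Int) : fcur data data.length = (blocksOf data).length := rfl

lemma tapeLoopA_nil (data : List Int) (fuel : Nat) (i : Int) (res : List Int) :
    tapeLoopA data (fuel + 1) [] i res = res := by
  simp [tapeLoopA]

lemma loopA_eq {data : List Int} (hpre : ∀ x ∈ data, 0 ≤ x) :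
    ∀ (fuel t b : Nat), data.length + 1 ≤ fuel + t → t ≤ data.length →
    fcur data t + b ≤ (blocksOf data).length →
    bcur data t = b →
    (flatOut data t).length = fcur data t + b →
    tapeLoopA data fuel
      (((blocksOf data).drop (fcur data t)).take ((blocksOf data).length - b - fcur data t))
      (t : Int) (flatOut data t)
      = (flatOut data data.length).take (blocksOf data).length := by
  intro fuel
  induction fuel with
  | zero => intro t b hfuel ht _ _ _; omega
  | succ fuel ih =>
    intro t b hfuel ht hbT hb hlen
    set T := (blocksOf data).length with hT
    set f := fcur data t with hf
    set files := ((blocksOf data).drop f).take (T - b - f) with hfiles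
    have hflen : files.length = T - b - f := by
      simp [hfiles, hT]
      omega
    simp only [tapeLoopA]
    by_cases hempty : files.length = 0
    · rw [if_pos hempty]
      rw [show flatOut data data.length = flatOut data t
          ++ ((List.range (data.length - t)).map (t + ·)).flatMap (outSeg data) from
          flat_split (outSeg data) ht]
      rw [List.take_append, List.take_of_length_le (by omega), show T - (flatOut data t).length = 0 by omega]
      simp
    · rw [if_neg hempty]
      have hlt : f + b < T := by omega
      have htn : t < data.length := by
        rcases lt_or_eq_of_le ht with h | h
        · exact h
        · exfalso
          have hfl := fcur_length data
          rw [← h] at hfl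
          omega
      have hd0 : 0 ≤ data.getD t 0 := getD_nonneg hpre t
      set D := (data.getD t 0).toNat with hD
      have hDeq : (data[t]?.getD 0).toNat = D := by rw [hD]; rfl
      have hdg : PySem.List.pyGetD data ((t : Nat) : Int) 0 = ((D : Nat) : Int) := by
        rw [PySem.List.pyGetD_natCast]; omega
      have hmod : PySem.Int.mod ((t : Nat) : Int) 2 = ((t % 2 : Nat) : Int) := by
        exact_mod_cast PySem.Int.mod_natCast t 2
      have hcast : ((t : Nat) : Int) + 1 = (((t + 1 : Nat)) : Int) := by push_cast; ring
      set lenf := T - b - f with hlenf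
      have hlenfpos : 0 < lenf := by omega
      have hdropf := drop_fcur htn
      by_cases ht2 : t % 2 = 0
      · -- even segment: file copied from the front
        have hmod0 : PySem.Int.mod ((t : Nat) : Int) 2 = 0 := by rw [hmod, ht2]; rfl
        simp only [hdg, hmod0, ite_true]
        rw [PySem.List.slice_to_natCast files D,
          PySem.List.slice_from files (Int.natCast_nonneg D), Int.toNat_natCast]
        have hgseg : gseg data t = List.replicate D ((t / 2 : Nat) : Int) := by
          unfold gseg; rw [if_pos ht2]
        have hfX : files = (List.replicate D ((t / 2 : Nat) : Int)
            ++ (blocksOf data).drop (fcur data (t + 1))).take lenf := by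
          rw [hfiles, hdropf, hgseg]
        have hfsucc : fcur data (t + 1) = f + D := by
          rw [fcur_succ, hgseg, ← hf, List.length_replicate]
        have houtev : outSeg data t = List.replicate D ((t / 2 : Nat) : Int) := by
          unfold outSeg; rw [if_pos ht2]
        by_cases hDlen : D ≤ lenf
        · -- the whole file fits in the remainder
          have htake : files.take D = List.replicate D ((t / 2 : Nat) : Int) := by
            rw [hfX, List.take_take, min_eq_left hDlen, List.take_append,
              List.take_replicate, min_self, List.length_replicate, Nat.sub_self,
              List.take_zero, List.append_nil]
          have hdrop : files.drop D = ((blocksOf data).drop (fcur data (t + 1))).take (lenf - D) := by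
            rw [hfX, List.drop_take, List.drop_append, List.length_replicate,
              List.drop_replicate, Nat.sub_self, List.drop_zero]
            simp
          rw [htake, hdrop, hcast, ← houtev, ← flatOut_succ]
          have := ih (t + 1) b (by omega) (by omega)
            (by rw [hfsucc]; omega)
            (by simp [bcur, ht2, hb])
            (by rw [flatOut_succ, List.length_append, hlen, houtev, List.length_replicate, hfsucc]; omega)
          rw [show T - b - fcur data (t+1) = lenf - D by rw [hfsucc]; omega] at this
          exact this
        · -- file clipped: the tape is full right after this chunk
          rw [Nat.not_le] at hDlen
          have htake : files.take D = List.replicate lenf ((t / 2 : Nat) : Int) := by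
            rw [List.take_of_length_le (by omega), hfX, List.take_append,
              List.take_replicate, min_eq_left (le_of_lt hDlen),
              show lenf - (List.replicate D ((t / 2 : Nat) : Int)).length = 0 by
                rw [List.length_replicate]; omega,
              List.take_zero, List.append_nil]
          have hdrop : files.drop D = [] := List.drop_eq_nil_of_le (by omega)
          rw [htake, hdrop]
          cases fuel with
          | zero => omega
          | succ fuel' =>
            rw [hcast, tapeLoopA_nil]
            rw [show flatOut data data.length = flatOut data t
                ++ ((List.range (data.length - t)).map (t + ·)).flatMap (outSeg data) from
                flat_split (outSeg data) (le_of_lt htn),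
              suffix_cons (outSeg data) htn]
            rw [List.take_append (l₁ := flatOut data t)]
            rw [List.take_of_length_le (show (flatOut data t).length ≤ T by omega)]
            rw [hlen, show T - (f + b) = lenf from by omega, houtev]
            rw [List.take_append, List.take_replicate, min_eq_left (le_of_lt hDlen),
              List.length_replicate, show lenf - D = 0 from by omega, List.take_zero,
              List.append_nil]
      · -- odd segment: gap filled from the back
        have hmodne : ¬ PySem.Int.mod ((t : Nat) : Int) 2 = 0 := by
          rw [hmod]; intro hcon
          have : (t % 2 : Nat) = 0 := by exact_mod_cast hcon
          omega
        simp only [hdg, if_neg hmodne]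
        have hgseg : gseg data t = [] := by unfold gseg; rw [if_neg ht2]
        have hfsucc : fcur data (t + 1) = f := by
          rw [fcur_succ, hgseg, ← hf, List.length_nil]
          omega
        by_cases hz : ((D : Nat) : Int) = 0
        · -- empty gap: skip
          have hD0 : D = 0 := by exact_mod_cast hz
          rw [if_neg (by simpa using hz), hcast]
          have houtodd : outSeg data t = [] := by
            unfold outSeg; rw [if_neg ht2, ← hD, hD0, List.take_zero]
          have hout : flatOut data (t + 1) = flatOut data t := by
            rw [flatOut_succ, houtodd, List.append_nil]
          have := ih (t + 1) b (by omega) (by omega)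
            (by rw [hfsucc]; omega)
            (by simp [bcur, ht2, hb, hDeq, hD0])
            (by rw [hout, hlen, hfsucc])
          rw [hfsucc, hout] at this
          exact this
        · have hDpos : 0 < D := by
            rcases Nat.eq_zero_or_pos D with h | h
            · exact absurd (by rw [h]; rfl) hz
            · exact h
          rw [if_pos (by simpa using hz)]
          rw [PySem.List.slice_from_neg_natCast files D hDpos,
            PySem.List.slice_to_neg_natCast files D hDpos, hflen]
          set R := (blocksOf data).reverse with hR
          have hRlen : R.length = T := by rw [hR, List.length_reverse]
          have hBdlen : ((blocksOf data).drop f).length = T - f := by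
            rw [List.length_drop]
          have h1 : files.reverse = List.drop (T - f - lenf) ((List.drop f (blocksOf data)).reverse) := by
            rw [hfiles, List.reverse_take, hBdlen]
          have h2 : (List.drop f (blocksOf data)).reverse = List.take (T - f) R := by
            rw [List.reverse_drop]
          have hrevfiles : files.reverse = List.take lenf (List.drop b R) := by
            rw [h1, h2, List.drop_take, show T - f - (T - f - lenf) = lenf from by omega,
              show T - f - lenf = b from by omega]
          have hchunk : (files.drop (lenf - D)).reverse = List.take (min D lenf) (List.drop b R) := by
            rw [List.reverse_drop, hflen, hrevfiles, List.take_take,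
              show min (lenf - (lenf - D)) lenf = min D lenf from by omega]
          have houtodd : outSeg data t = List.take D (List.drop b R) := by
            unfold outSeg; rw [if_neg ht2, hb, ← hD, hR]
          by_cases hDlen : D ≤ lenf
          · -- the gap is filled completely
            have hchunk' : (files.drop (lenf - D)).reverse = outSeg data t := by
              rw [hchunk, min_eq_left hDlen, houtodd]
            have hfilesnew : files.take (lenf - D)
                = ((blocksOf data).drop (fcur data (t+1))).take (T - (b + D) - fcur data (t+1)) := by
              rw [hfiles, List.take_take, min_eq_left (by omega), hfsucc]
              congr 1
              omega
            rw [hchunk', ← flatOut_succ, hcast, hfilesnew]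
            exact ih (t + 1) (b + D) (by omega) (by omega)
              (by rw [hfsucc]; omega)
              (by simp [bcur, ht2, hb, hDeq])
              (by rw [flatOut_succ, List.length_append, hlen, houtodd, List.length_take,
                   List.length_drop, hRlen, hfsucc]; omega)
          · -- gap larger than what is left: the tape ends inside this gap
            rw [Nat.not_le] at hDlen
            have htake0 : files.take (lenf - D) = [] := by
              rw [show lenf - D = 0 from by omega, List.take_zero]
            rw [htake0, hchunk, min_eq_right (le_of_lt hDlen)]
            cases fuel with
            | zero => omega
            | succ fuel' =>
              rw [hcast, tapeLoopA_nil]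
              rw [show flatOut data data.length = flatOut data t
                  ++ ((List.range (data.length - t)).map (t + ·)).flatMap (outSeg data) from
                  flat_split (outSeg data) (le_of_lt htn),
                suffix_cons (outSeg data) htn]
              rw [List.take_append (l₁ := flatOut data t)]
              rw [List.take_of_length_le (show (flatOut data t).length ≤ T by omega)]
              rw [hlen, show T - (f + b) = lenf from by omega, houtodd]
              rw [List.take_append, List.take_take, min_eq_left (le_of_lt hDlen),
                List.length_take, List.length_drop, hRlen,
                show lenf - min D (T - b) = 0 from by omega, List.take_zero, List.append_nil]


lemma filesA_eq (data : List Int) :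
    ((List.range data.length).foldl
      (fun files i => if i % 2 = 0 then
          files ++ PySem.List.pyRepeat [((i / 2 : Nat) : Int)] (PySem.List.pyGetD data (i : Int) 0)
        else files) []) = blocksOf data := by
  have h : ∀ (acc : List Int) (i : Nat),
      (if i % 2 = 0 then
          acc ++ PySem.List.pyRepeat [((i / 2 : Nat) : Int)] (PySem.List.pyGetD data (i : Int) 0)
        else acc) = acc ++ gseg data i := by
    intro acc i
    unfold gseg
    split <;> simp [PySem.List.pyRepeat_singleton, PySem.List.pyGetD_natCast]
  calc ((List.range data.length).foldl
      (fun files i => if i % 2 = 0 then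
          files ++ PySem.List.pyRepeat [((i / 2 : Nat) : Int)] (PySem.List.pyGetD data (i : Int) 0)
        else files) [])
      = (List.range data.length).foldl (fun acc i => acc ++ gseg data i) [] := by
        exact PySem.List.foldl_congr_mem _ _ _ _ (fun acc x _ => h acc x)
    _ = blocksOf data := by
        rw [PySem.List.foldl_append_eq_flatMap]; rfl

lemma flatMap_gseg_even (data : List Int) : ∀ n : Nat,
    (List.range n).flatMap (gseg data)
      = (List.range ((n + 1) / 2)).flatMap
          (fun k => List.replicate (data.getD (2 * k) 0).toNat (k : Int)) := by
  intro n
  induction n with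
  | zero => rfl
  | succ n ih =>
    rw [List.range_succ, List.flatMap_append, ih]
    by_cases hn : n % 2 = 0
    · rw [show (n + 1 + 1) / 2 = (n + 1) / 2 + 1 by omega, List.range_succ,
        List.flatMap_append]
      congr 1
      simp only [List.flatMap_cons, List.flatMap_nil, List.append_nil]
      unfold gseg
      rw [if_pos hn, show 2 * ((n + 1) / 2) = n by omega, show (n + 1) / 2 = n / 2 by omega]
    · rw [show (n + 1 + 1) / 2 = (n + 1) / 2 by omega]
      simp [gseg, hn]

lemma blocksB_eq (data : List Int) :
    ((PySem.List.pyRange 0 (PySem.List.len data) 2).foldl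
      (fun bl i => bl ++ PySem.List.pyRepeat [PySem.Int.floordiv i 2] (PySem.List.pyGetD data i 0)) [])
      = blocksOf data := by
  rw [PySem.List.foldl_append_eq_flatMap, List.nil_append, PySem.List.len_eq,
    PySem.List.pyRange_of_pos 0 (data.length : Int) (by norm_num)]
  have hm : (if (0:Int) < (data.length : Int) then
      (((data.length : Int) - 0 + 2 - 1) / 2).toNat else 0) = (data.length + 1) / 2 := by
    split <;> omega
  rw [hm, List.flatMap_map, blocksOf, flatMap_gseg_even data]
  congr 1
  funext k
  have h1 : (0:Int) + 2 * (k : Int) = ((2 * k : Nat) : Int) := by push_cast; ring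
  rw [h1, PySem.List.pyGetD_natCast]
  have h2 : PySem.Int.floordiv ((2 * k : Nat) : Int) 2 = (((2 * k) / 2 : Nat) : Int) := by
    exact_mod_cast PySem.Int.floordiv_natCast (2 * k) 2
  rw [h2, show (2 * k) / 2 = k by omega, PySem.List.pyRepeat_singleton]

lemma foldB_eq {data : List Int} (hpre : ∀ x ∈ data, 0 ≤ x) (t : Nat) :
    ((List.range t).foldl
      (fun (s : List Int × Int) i =>
        if i % 2 = 0 then
          (s.1 ++ PySem.List.pyRepeat [((i / 2 : Nat) : Int)] (PySem.List.pyGetD data (i : Int) 0), s.2)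
        else
          (s.1 ++ PySem.List.slice (blocksOf data).reverse (some s.2) (some (s.2 + PySem.List.pyGetD data (i : Int) 0)),
           s.2 + PySem.List.pyGetD data (i : Int) 0))
      ([], 0)) = (flatOut data t, (bcur data t : Int)) := by
  induction t with
  | zero => simp [flatOut, bcur]
  | succ t ih =>
    rw [List.range_succ, List.foldl_append, ih, List.foldl_cons, List.foldl_nil]
    have hd0 : 0 ≤ data.getD t 0 := getD_nonneg hpre t
    by_cases ht2 : t % 2 = 0
    · rw [if_pos ht2]
      simp only [PySem.List.pyRepeat_singleton, PySem.List.pyGetD_natCast]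
      rw [show flatOut data (t + 1) = flatOut data t ++ outSeg data t by
        simp [flatOut, List.range_succ]]
      rw [show outSeg data t = List.replicate (data.getD t 0).toNat ((t / 2 : Nat) : Int) from by
        unfold outSeg; rw [if_pos ht2]]
      rw [show bcur data (t + 1) = bcur data t from by simp [bcur, ht2]]
    · rw [if_neg ht2]
      simp only [PySem.List.pyGetD_natCast]
      rw [PySem.List.slice_toNat _ (Int.natCast_nonneg _) (by omega)]
      rw [show ((bcur data t : Int) + data.getD t 0).toNat - ((bcur data t : Int)).toNat
          = (data.getD t 0).toNat from by omega]
      rw [Int.toNat_natCast]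
      rw [show flatOut data (t + 1) = flatOut data t ++ outSeg data t by
        simp [flatOut, List.range_succ]]
      rw [show outSeg data t = ((blocksOf data).reverse.drop (bcur data t)).take (data.getD t 0).toNat
        from by unfold outSeg; rw [if_neg ht2]]
      rw [show bcur data (t + 1) = bcur data t + (data.getD t 0).toNat from by simp [bcur, ht2]]
      refine Prod.ext rfl ?_
      simp only []
      omega


-- ===== VERDICT (by name: the statement is the Claim_ definition above) =====
theorem create_tape1_spec : Claim_equal_create_tape1 := by
  intro data _ hpre
  unfold Spec_create_tape1 create_tape1 create_tape1_alt
  simp only [filesA_eq data, blocksB_eq data]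
  rw [foldB_eq hpre data.length]
  rw [PySem.List.len_eq, PySem.List.slice_to_natCast]
  have h0 := loopA_eq hpre (data.length + 1) 0 0 (by omega) (by omega)
    (by simp [fcur]) rfl (by simp [flatOut, fcur])
  simp only [show fcur data 0 = 0 from rfl, show flatOut data 0 = [] from rfl,
    Nat.sub_zero, List.drop_zero, List.take_length, Nat.cast_zero] at h0
  exact h0
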